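-- pv_equiv track=rewrite | github.com/cloudvlad/CS50 | dna.py | analiser
-- ===== SOURCE A (Python) =====
-- def analiser(sample, strs):
--     analise = {}
--
--     for s in strs:
--         analise[s] = 0
--
--     for s in strs:
--         last_index = 0
--         entry = []
--         while True:
--             p = int(sample.find(s, last_index))
--             if p < 0:
--                 entry.append(p)
--                 analise[s] = find_max_entry(entry, len(s))
--                 break
--             else:
--                 entry.append(p)
--                 last_index = p + len(s)  # Change the strating range (last_index) by the lengts of the STR
--
--     return analise
--
-- def find_max_entry(entry, size):
--     max_entry = 0
--     temp_entry = 0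
--     # If there is only one value (the negative ending of the STR type entries),
--     # returns 0 as there are no entries for the STR type
--     if(len(entry) == 1):
--         return 0
--
--     # Check every entry
--     for i in range(0, len(entry)):
--         # If the next item is not an entry, but end (negative value) ...
--         if entry[i+1] < 0:
--             # ...if the previous entry is next to this:
--             if entry[i-1] == entry[i] - size:
--                 temp_entry += 1\
--                     # ...if they are not next to each other:
--             else:
--                 temp_entry = 1
--             # If the previous max contigious counter is smaller then the new contigious counter
--             # make the max counter equal to the temporary (new) counter
--             if max_entry < temp_entry:
--                 max_entry = temp_entry
--             # Return the max counter, because there are no more entries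
--             return max_entry
--         # If the previous entry is next to the new
--         if entry[i-1] == entry[i] - size:
--             temp_entry += 1
--             if max_entry < temp_entry:
--                 max_entry = temp_entry
--         # Reset the
--         else:
--             temp_entry = 1
--
--     return max_entry
-- ===== SOURCE B (Python) =====
-- def analiser(sample, strs):
--     # Count each run of consecutive aligned repeats inline, jumping between
--     # runs with find; no occurrence list, no post-processing pass.
--     res = {}
--     for s in strs:
--         L = len(s)
--         best = 0
--         i = 0
--         while True:
--             p = sample.find(s, i)
--             if p < 0:
--                 break
--             cnt = 1
--             j = p + L
--             while sample.startswith(s, j):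
--                 cnt += 1
--                 j += L
--             if cnt > best:
--                 best = cnt
--             i = j
--         res[s] = best
--     return res
-- ===== Notes on version B (the rewrite author's own statement) =====
-- stated objective: simpler
-- what changed: B drops A's occurrence-position list and the separate find_max_entry pass (with its -1 sentinel, index arithmetic and negative-index wraparound) and instead counts each run of consecutive aligned repeats inline while jumping from run to run with find, keeping only a running best per STR.
import Mathlib
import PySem

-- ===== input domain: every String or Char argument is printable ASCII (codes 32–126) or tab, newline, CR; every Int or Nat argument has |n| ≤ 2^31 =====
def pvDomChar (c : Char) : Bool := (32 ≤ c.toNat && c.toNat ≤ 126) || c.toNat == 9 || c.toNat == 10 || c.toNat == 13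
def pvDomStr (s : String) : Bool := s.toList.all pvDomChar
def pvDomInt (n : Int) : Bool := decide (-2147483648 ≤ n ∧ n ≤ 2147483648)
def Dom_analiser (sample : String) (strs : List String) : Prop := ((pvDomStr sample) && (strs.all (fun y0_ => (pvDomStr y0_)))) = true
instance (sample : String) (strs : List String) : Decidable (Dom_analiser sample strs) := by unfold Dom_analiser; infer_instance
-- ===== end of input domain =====

-- B replaces A's occurrence-position list and its separate index/sentinel
-- post-processing pass by counting each run of consecutive aligned repeats
-- inline, jumping between runs with find (objective: simpler).


-- ===== PORT A =====
-- the 'while True' loop collecting occurrence positions; fuel = len(sample)+1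
-- suffices on Pre_ (each found occurrence advances last_index by len(s) ≥ 1)
def pvEntryLoop (cs t : List Char) (fuel : Nat) (lastIndex : Int) (entry : List Int) : List Int :=
  match fuel with
  | 0 => entry
  | f + 1 =>
    let p := PySem.Chars.findFrom cs t lastIndex none
    if p < 0 then entry ++ [p]
    else pvEntryLoop cs t f (p + (t.length : Int)) (entry ++ [p])

-- the 'for i in range(0, len(entry))' loop of find_max_entry; the getD 0 on the
-- entry[i+1] lookup is unreachable on the entries A builds (they end with -1)
def pvFindMaxLoop (entry : List Int) (size : Int) (i : Nat) (maxE tempE : Int) : Int :=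
  if h : i < entry.length then
    let nxt := (PySem.List.pyGet? entry ((i : Int) + 1)).getD 0
    let prev := (PySem.List.pyGet? entry ((i : Int) - 1)).getD 0
    let cur := (PySem.List.pyGet? entry (i : Int)).getD 0
    if nxt < 0 then
      let tmp := if prev = cur - size then tempE + 1 else 1
      if maxE < tmp then tmp else maxE
    else
      if prev = cur - size then
        let tmp := tempE + 1
        pvFindMaxLoop entry size (i + 1) (if maxE < tmp then tmp else maxE) tmp
      else pvFindMaxLoop entry size (i + 1) maxE 1
  else maxE
termination_by entry.length - i
decreasing_by all_goals omega

def pvFindMaxEntry (entry : List Int) (size : Int) : Int :=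
  if entry.length = 1 then 0 else pvFindMaxLoop entry size 0 0 0

def analiser (sample : String) (strs : List String) : List (String × Int) :=
  let d0 := strs.foldl (fun d s => PySem.Dict.insert d s (0 : Int)) PySem.Dict.empty
  let d1 := strs.foldl (fun d s =>
    PySem.Dict.insert d s (pvFindMaxEntry
      (pvEntryLoop sample.toList s.toList (sample.toList.length + 1) 0 [])
      (s.toList.length : Int))) d0
  d1.items

-- ===== PORT B =====
-- inner 'while sample[j:j+L] == s' loop; fuel = len(sample)+1 suffices on Pre_
def pvRun (cs t : List Char) (fuel : Nat) (j : Nat) (cnt : Int) : Int × Nat :=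
  match fuel with
  | 0 => (cnt, j)
  | f + 1 =>
    -- sample.startswith(s, j) ported as startswith on cs.drop j (exact: 0 ≤ j)
    if PySem.Chars.startswith (cs.drop j) t then
      pvRun cs t f (j + t.length) (cnt + 1)
    else (cnt, j)

-- outer 'while True' loop jumping from run to run with find
def pvScan (cs t : List Char) (fuel : Nat) (best : Int) (i : Nat) : Int :=
  match fuel with
  | 0 => best
  | f + 1 =>
    let p := PySem.Chars.findFrom cs t (i : Int) none
    if p < 0 then best
    else
      -- j := p + len(s); p ≥ 0 here, so the Nat form p.toNat + t.length is exact
      let r := pvRun cs t (cs.length + 1) (p.toNat + t.length) 1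
      pvScan cs t f (if best < r.1 then r.1 else best) r.2

def analiser_alt (sample : String) (strs : List String) : List (String × Int) :=
  (strs.foldl (fun d s =>
    PySem.Dict.insert d s (pvScan sample.toList s.toList (sample.toList.length + 1) 0 0))
    PySem.Dict.empty).items

-- ===== PRECONDITION & SPEC =====
-- Pre_ excludes strs containing the empty string: there A (and B) loop forever
-- (sample.find('', i) returns i, so last_index never advances); A never returns.
def Pre_analiser (sample : String) (strs : List String) : Prop := ∀ s ∈ strs, s ≠ ""
instance (sample : String) (strs : List String) : Decidable (Pre_analiser sample strs) := by unfold Pre_analiser; infer_instance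
def pvWitness_analiser : String × List String := ("AGATCAGATCTT", ["AGATC", "TT", "GA"])

def Spec_analiser (sample : String) (strs : List String) (out : List (String × Int)) : Prop := out = analiser_alt sample strs
instance (sample : String) (strs : List String) (out : List (String × Int)) : Decidable (Spec_analiser sample strs out) := by unfold Spec_analiser; infer_instance

-- ===== CLAIM (what is proved, stated in full; the proofs are below) =====
def Claim_equal_analiser : Prop := ∀ (sample : String) (strs : List String), Dom_analiser sample strs → Pre_analiser sample strs → Spec_analiser sample strs (analiser sample strs)

-- ===== LEMMAS AND PROOFS =====

-- the max-run reference function both sides are reduced to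
def pvMr (L : Int) : List Int → Int → Int → Int → Int
  | [], _, m, _ => m
  | p :: rest, prev, m, r =>
    let r' := if prev = p - L then r + 1 else 1
    pvMr L rest p (if m < r' then r' else m) r'

-- find_max_entry's index loop, re-expressed structurally on the suffix
def pvGo (size : Int) : List Int → Int → Int → Int → Int
  | [], _, m, _ => m
  | p :: rest, prev, m, r =>
    let nxt := rest.headD 0
    if nxt < 0 then
      let tmp := if prev = p - size then r + 1 else 1
      if m < tmp then tmp else m
    else if prev = p - size then
      pvGo size rest p (if m < r + 1 then r + 1 else m) (r + 1)
    else pvGo size rest p m 1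

-- the greedy occurrence-position list, fuel-free
def pvGl (cs t : List Char) (ht : t ≠ []) (k : Nat) : List Int :=
  if hk : k ≤ cs.length then
    let r := PySem.Chars.findFrom cs t (k : Int) none
    if hr : r < 0 then []
    else r :: pvGl cs t ht (r.toNat + t.length)
  else []
termination_by cs.length + 1 - k
decreasing_by
  have hne : PySem.Chars.findFrom cs t (k : Int) none ≠ -1 := by omega
  have hspec := PySem.Chars.findFrom_natCast_spec cs t k hk hne
  have hlen : 1 ≤ t.length := List.length_pos_of_ne_nil ht
  omega

def pvAVal (L : Int) (ps : List Int) : Int :=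
  match ps with
  | [] => 0
  | p :: rest => pvMr L rest p 1 1

theorem pvAVal_nil (L : Int) : pvAVal L [] = 0 := rfl

theorem pvAVal_cons (L : Int) (p : Int) (rest : List Int) :
    pvAVal L (p :: rest) = pvMr L rest p 1 1 := rfl


theorem pvPrefix_bound (cs t : List Char) (j : Nat) (ht : t ≠ []) (h : t <+: cs.drop j) :
    j + t.length ≤ cs.length := by
  have h1 := h.length_le
  have h2 := List.length_pos_of_ne_nil ht
  simp only [List.length_drop] at h1
  omega

theorem pvFF_neg_iff (cs t : List Char) (k : Nat) (hk : k ≤ cs.length) :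
    PySem.Chars.findFrom cs t (k : Int) none = -1 ↔ ∀ i, k ≤ i → ¬ t <+: cs.drop i := by
  rw [PySem.Chars.findFrom_natCast_eq_neg_one_iff cs t k hk]
  constructor
  · intro hni i hki hpre
    apply hni
    rw [← PySem.Chars.isIn_iff_infix, ← PySem.Chars.exists_prefix_drop_iff_isIn]
    refine ⟨i - k, ?_⟩
    rw [List.drop_drop]
    have : k + (i - k) = i := by omega
    rw [this]; exact hpre
  · intro hall hinf
    rw [← PySem.Chars.isIn_iff_infix, ← PySem.Chars.exists_prefix_drop_iff_isIn] at hinf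
    obtain ⟨j, hj⟩ := hinf
    rw [List.drop_drop] at hj
    exact hall (k + j) (by omega) hj

theorem pvGl_big (cs t : List Char) (ht : t ≠ []) (k : Nat) (hk : cs.length < k) :
    pvGl cs t ht k = [] := by
  rw [pvGl, dif_neg (by omega)]

theorem pvGl_nil (cs t : List Char) (ht : t ≠ []) (k : Nat) (hk : k ≤ cs.length)
    (h : ∀ i, k ≤ i → ¬ t <+: cs.drop i) : pvGl cs t ht k = [] := by
  have hm : PySem.Chars.findFrom cs t (k : Int) none = -1 := (pvFF_neg_iff cs t k hk).mpr h
  rw [pvGl, dif_pos hk]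
  simp only [hm]
  norm_num

theorem pvGl_cons (cs t : List Char) (ht : t ≠ []) (k : Nat) (hk : k ≤ cs.length)
    (hM : t <+: cs.drop k) : pvGl cs t ht k = (k : Int) :: pvGl cs t ht (k + t.length) := by
  have hne : PySem.Chars.findFrom cs t (k : Int) none ≠ -1 := by
    simp only [ne_eq, pvFF_neg_iff cs t k hk]
    push_neg
    exact ⟨k, le_refl _, hM⟩
  obtain ⟨hge, hpre, hmin⟩ := PySem.Chars.findFrom_natCast_spec cs t k hk hne
  have h0 : (0 : Int) ≤ PySem.Chars.findFrom cs t (k : Int) none := by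
    have : (0 : Int) ≤ (k : Int) := Int.natCast_nonneg k
    omega
  have htn : (PySem.Chars.findFrom cs t (k : Int) none).toNat = k := by
    by_contra hnk
    have hkl : k < (PySem.Chars.findFrom cs t (k : Int) none).toNat := by omega
    exact hmin k (le_refl _) hkl hM
  have hff : PySem.Chars.findFrom cs t (k : Int) none = (k : Int) := by omega
  rw [pvGl, dif_pos hk]
  simp only [hff]
  rw [dif_neg (by omega)]
  simp

theorem pvGl_step (cs t : List Char) (ht : t ≠ []) (k : Nat) (hk : k ≤ cs.length)
    (hnM : ¬ t <+: cs.drop k) : pvGl cs t ht k = pvGl cs t ht (k + 1) := by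
  by_cases hkn : k = cs.length
  · subst hkn
    have hno : ∀ i, cs.length ≤ i → ¬ t <+: cs.drop i := by
      intro i hi hpre
      have := pvPrefix_bound cs t i ht hpre
      have := List.length_pos_of_ne_nil ht
      omega
    rw [pvGl_nil cs t ht _ hk hno, pvGl_big cs t ht _ (by omega)]
  · have hk1 : k + 1 ≤ cs.length := by omega
    by_cases hex : ∃ i, k + 1 ≤ i ∧ t <+: cs.drop i
    · obtain ⟨i0, hi0, hp0⟩ := hex
      have hne : PySem.Chars.findFrom cs t (k : Int) none ≠ -1 := by
        simp only [ne_eq, pvFF_neg_iff cs t k hk]; push_neg; exact ⟨i0, by omega, hp0⟩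
      have hne1 : PySem.Chars.findFrom cs t ((k + 1 : Nat) : Int) none ≠ -1 := by
        simp only [ne_eq, pvFF_neg_iff cs t (k + 1) hk1]; push_neg; exact ⟨i0, hi0, hp0⟩
      obtain ⟨hge, hpre, hmin⟩ := PySem.Chars.findFrom_natCast_spec cs t k hk hne
      obtain ⟨hge1, hpre1, hmin1⟩ := PySem.Chars.findFrom_natCast_spec cs t (k + 1) hk1 hne1
      set r := PySem.Chars.findFrom cs t (k : Int) none with hr
      set r1 := PySem.Chars.findFrom cs t ((k + 1 : Nat) : Int) none with hr1
      have h0 : (0 : Int) ≤ r := by have : (0 : Int) ≤ (k : Int) := Int.natCast_nonneg k; omega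
      have h01 : (0 : Int) ≤ r1 := by have : (0 : Int) ≤ ((k + 1 : Nat) : Int) := Int.natCast_nonneg _; omega
      have hrk : r.toNat ≠ k := by
        intro hc
        rw [← hc] at hnM
        exact hnM hpre
      have hreq : r = r1 := by
        have hle : r1.toNat ≤ r.toNat := by
          by_contra hlt
          exact hmin1 r.toNat (by omega) (by omega) hpre
        have hge' : r1.toNat ≥ r.toNat := by
          by_contra hlt
          exact hmin r1.toNat (by omega) (by omega) hpre1
        omega
      rw [pvGl, dif_pos hk]
      conv_rhs => rw [pvGl, dif_pos hk1]
      simp only []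
      rw [← hr, ← hr1, hreq]
    · push_neg at hex
      have hno : ∀ i, k ≤ i → ¬ t <+: cs.drop i := by
        intro i hi hpre
        rcases Nat.lt_or_ge i (k + 1) with h | h
        · have : i = k := by omega
          subst this; exact hnM hpre
        · exact hex i h hpre
      rw [pvGl_nil cs t ht k hk hno,
          pvGl_nil cs t ht (k + 1) hk1 (fun i hi => hno i (by omega))]

theorem pvGl_nonneg (cs t : List Char) (ht : t ≠ []) (k : Nat) :
    ∀ x ∈ pvGl cs t ht k, 0 ≤ x := by
  have hL : 1 ≤ t.length := List.length_pos_of_ne_nil ht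
  have H : ∀ (fuel k : Nat), cs.length + 1 - k ≤ fuel → ∀ x ∈ pvGl cs t ht k, 0 ≤ x := by
    intro fuel
    induction fuel with
    | zero =>
      intro k hk x hx
      rw [pvGl_big cs t ht k (by omega)] at hx
      simp at hx
    | succ f ih =>
      intro k hk x hx
      by_cases hkn : k ≤ cs.length
      · rw [pvGl, dif_pos hkn] at hx
        simp only [] at hx
        by_cases hr : PySem.Chars.findFrom cs t (k : Int) none < 0
        · rw [dif_pos hr] at hx
          simp at hx
        · rw [dif_neg hr] at hx
          have hne : PySem.Chars.findFrom cs t (k : Int) none ≠ -1 := by omega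
          obtain ⟨hge, hpre, hmin⟩ := PySem.Chars.findFrom_natCast_spec cs t k hkn hne
          rcases List.mem_cons.mp hx with h | h
          · omega
          · have h0 : (0 : Int) ≤ (k : Int) := Int.natCast_nonneg k
            exact ih (((PySem.Chars.findFrom cs t (k : Int) none).toNat + t.length)) (by omega) x h
      · rw [pvGl_big cs t ht k (by omega)] at hx
        simp at hx
  exact H (cs.length + 1) k (by omega)

theorem pvGl_head_ge (cs t : List Char) (ht : t ≠ []) (k : Nat) (p : Int) (rest : List Int)
    (h : pvGl cs t ht k = p :: rest) : (k : Int) ≤ p := by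
  by_cases hk : k ≤ cs.length
  · rw [pvGl, dif_pos hk] at h
    simp only [] at h
    by_cases hr : PySem.Chars.findFrom cs t (k : Int) none < 0
    · rw [dif_pos hr] at h
      exact absurd h (by simp)
    · rw [dif_neg hr] at h
      have hne : PySem.Chars.findFrom cs t (k : Int) none ≠ -1 := by omega
      obtain ⟨hge, _, _⟩ := PySem.Chars.findFrom_natCast_spec cs t k hk hne
      obtain ⟨hp, -⟩ := List.cons.injEq .. ▸ h
      omega
  · rw [pvGl_big cs t ht k (by omega)] at h
    exact absurd h (by simp)

theorem pvEntryLoop_eq (cs t : List Char) (ht : t ≠ []) :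
    ∀ (fuel k : Nat) (e : List Int), k ≤ cs.length → cs.length + 1 - k ≤ fuel →
    pvEntryLoop cs t fuel (k : Int) e = e ++ pvGl cs t ht k ++ [-1] := by
  have hL : 1 ≤ t.length := List.length_pos_of_ne_nil ht
  intro fuel
  induction fuel with
  | zero =>
    intro k e hk hf
    omega
  | succ f ih =>
    intro k e hk hf
    simp only [pvEntryLoop]
    by_cases hneg : PySem.Chars.findFrom cs t (k : Int) none < 0
    · rw [if_pos hneg]
      have hm1 : PySem.Chars.findFrom cs t (k : Int) none = -1 := by
        rw [PySem.Chars.findFrom_natCast cs t k hk]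
        have := PySem.Chars.neg_one_le_find (cs.drop k) t
        rw [PySem.Chars.findFrom_natCast cs t k hk] at hneg
        by_cases hfd : PySem.Chars.find (cs.drop k) t = -1
        · rw [if_pos hfd]
        · rw [if_neg hfd]
          rw [if_neg hfd] at hneg
          have h0 : (0 : Int) ≤ (k : Int) := Int.natCast_nonneg k
          omega
      have hgl : pvGl cs t ht k = [] := by
        rw [pvGl, dif_pos hk]
        simp only []
        rw [dif_pos hneg]
      rw [hgl, hm1]
      simp
    · rw [if_neg hneg]
      have hne : PySem.Chars.findFrom cs t (k : Int) none ≠ -1 := by omega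
      obtain ⟨hge, hpre, hmin⟩ := PySem.Chars.findFrom_natCast_spec cs t k hk hne
      have h0 : (0 : Int) ≤ (k : Int) := Int.natCast_nonneg k
      have hb := pvPrefix_bound cs t _ ht hpre
      have hcast : PySem.Chars.findFrom cs t (k : Int) none + (t.length : Int) =
          (((PySem.Chars.findFrom cs t (k : Int) none).toNat + t.length : Nat) : Int) := by
        push_cast
        omega
      rw [hcast,
        ih ((PySem.Chars.findFrom cs t (k : Int) none).toNat + t.length) (e ++ [PySem.Chars.findFrom cs t (k : Int) none]) (by omega) (by omega)]
      have hgl : pvGl cs t ht k = PySem.Chars.findFrom cs t (k : Int) none ::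
          pvGl cs t ht ((PySem.Chars.findFrom cs t (k : Int) none).toNat + t.length) := by
        rw [pvGl, dif_pos hk]
        simp only []
        rw [dif_neg hneg]
      rw [hgl]
      simp

theorem pvBridge (entry : List Int) (size : Int) :
    ∀ (cnt i : Nat) (maxE tempE : Int), entry.length - i ≤ cnt →
    pvFindMaxLoop entry size i maxE tempE =
      pvGo size (entry.drop i) ((PySem.List.pyGet? entry ((i : Int) - 1)).getD 0) maxE tempE := by
  intro cnt
  induction cnt with
  | zero =>
    intro i maxE tempE hle
    rw [pvFindMaxLoop, dif_neg (by omega), List.drop_eq_nil_of_le (by omega)]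
    simp [pvGo]
  | succ c ih =>
    intro i maxE tempE hle
    by_cases hi : i < entry.length
    · rw [pvFindMaxLoop, dif_pos hi, List.drop_eq_getElem_cons hi]
      simp only [pvGo]
      have hnxt : (PySem.List.pyGet? entry ((i : Int) + 1)).getD 0 = (entry.drop (i + 1)).headD 0 := by
        have hc : ((i : Int) + 1) = ((i + 1 : Nat) : Int) := by push_cast; ring
        rw [hc, PySem.List.pyGet?_natCast, List.headD_eq_head?, List.head?_drop]
      have hcur : (PySem.List.pyGet? entry (i : Int)).getD 0 = entry[i] := by
        rw [PySem.List.pyGet?_natCast, List.getElem?_eq_getElem hi]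
        rfl
      have hprev1 : (PySem.List.pyGet? entry (((i + 1 : Nat) : Int) - 1)).getD 0 = entry[i] := by
        have hc : (((i + 1 : Nat) : Int) - 1) = ((i : Nat) : Int) := by push_cast; ring
        rw [hc, PySem.List.pyGet?_natCast, List.getElem?_eq_getElem hi]
        rfl
      rw [hnxt, hcur]
      by_cases h1 : (entry.drop (i + 1)).headD 0 < 0
      · rw [if_pos h1, if_pos h1]
      · rw [if_neg h1, if_neg h1]
        by_cases h2 : (PySem.List.pyGet? entry ((i : Int) - 1)).getD 0 = entry[i] - size
        · rw [if_pos h2, if_pos h2, ih (i + 1) _ _ (by omega), hprev1]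
        · rw [if_neg h2, if_neg h2, ih (i + 1) _ _ (by omega), hprev1]
    · rw [pvFindMaxLoop, dif_neg hi, List.drop_eq_nil_of_le (by omega)]
      simp [pvGo]

theorem pvMaxIf (a b : Int) : (if a < b then b else a) = max a b := by
  simp [Int.max_def]; split_ifs <;> omega

theorem pvMr_ge (L : Int) : ∀ (ps : List Int) (prev m r : Int), m ≤ pvMr L ps prev m r := by
  intro ps
  induction ps with
  | nil => intro prev m r; simp [pvMr]
  | cons p rest ih =>
    intro prev m r
    simp only [pvMr]
    refine le_trans ?_ (ih p _ _)
    split_ifs <;> omega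

theorem pvAVal_nonneg (L : Int) (ps : List Int) : 0 ≤ pvAVal L ps := by
  cases ps with
  | nil => simp [pvAVal]
  | cons p rest =>
    simp only [pvAVal]
    have := pvMr_ge L rest p 1 1
    omega

theorem pvMrMax (L : Int) : ∀ (ps : List Int) (prev m r : Int), 1 ≤ r → r ≤ m →
    pvMr L ps prev m r = max m (pvMr L ps prev r r) := by
  intro ps
  induction ps with
  | nil =>
    intro prev m r h1 h2
    simp [pvMr, Int.max_def]
    omega
  | cons p rest ih =>
    intro prev m r h1 h2
    simp only [pvMr, pvMaxIf]
    by_cases hc : prev = p - L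
    · simp only [if_pos hc]
      rw [ih p (max m (r + 1)) (r + 1) (by omega) (le_max_right _ _),
          ih p (max r (r + 1)) (r + 1) (by omega) (le_max_right _ _)]
      simp [Int.max_def]; split_ifs <;> omega
    · simp only [if_neg hc]
      rw [ih p (max m 1) 1 (le_refl _) (le_max_right _ _),
          ih p (max r 1) 1 (le_refl _) (le_max_right _ _)]
      simp [Int.max_def]; split_ifs <;> omega

theorem pvGoMr (size : Int) (hs : 1 ≤ size) : ∀ (ps : List Int) (prev m r : Int),
    (∀ x ∈ ps, 0 ≤ x) → -1 ≤ prev → 1 ≤ m →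
    pvGo size (ps ++ [-1]) prev m r = pvMr size ps prev m r := by
  intro ps
  induction ps with
  | nil =>
    intro prev m r hnn hprev hm
    have hne : ¬ prev = -1 - size := by omega
    simp [pvGo, pvMr, hne]
  | cons q rest ih =>
    intro prev m r hnn hprev hm
    cases rest with
    | nil =>
      simp only [List.cons_append, List.nil_append, pvGo, pvMr, List.headD]
      norm_num
    | cons q2 rest2 =>
      have hq : 0 ≤ q := hnn q (by simp)
      have hq2 : 0 ≤ q2 := hnn q2 (by simp)
      rw [List.cons_append, pvGo]
      rw [if_neg (by simp [List.headD]; omega)]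
      conv_rhs => rw [pvMr]
      by_cases hc : prev = q - size
      · rw [if_pos hc, if_pos hc,
          ih q _ _ (fun x hx => hnn x (List.mem_cons_of_mem q hx)) (by omega) (by split_ifs <;> omega)]
      · rw [if_neg hc, if_neg hc,
          ih q _ _ (fun x hx => hnn x (List.mem_cons_of_mem q hx)) (by omega) (by omega)]
        rw [show (if m < (1:Int) then (1:Int) else m) = m by split_ifs <;> omega]

theorem pvGoMr0 (size : Int) (hs : 1 ≤ size) : ∀ (ps : List Int) (prev : Int),
    ps ≠ [] → (∀ x ∈ ps, 0 ≤ x) → -1 ≤ prev →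
    pvGo size (ps ++ [-1]) prev 0 1 = pvMr size ps prev 1 1 := by
  intro ps
  induction ps with
  | nil =>
    intro prev hne hnn hprev
    exact absurd rfl hne
  | cons q rest ih =>
    intro prev _ hnn hprev
    have hq : 0 ≤ q := hnn q (by simp)
    cases rest with
    | nil =>
      simp only [List.cons_append, List.nil_append, pvGo, pvMr, List.headD]
      split_ifs <;> omega
    | cons q2 rest2 =>
      have hq2 : 0 ≤ q2 := hnn q2 (by simp)
      rw [List.cons_append, pvGo]
      rw [if_neg (by simp [List.headD]; omega)]
      conv_rhs => rw [pvMr]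
      by_cases hc : prev = q - size
      · rw [if_pos hc, if_pos hc]
        norm_num
        exact pvGoMr size hs _ q _ _ (fun x hx => hnn x (List.mem_cons_of_mem q hx)) (by omega) (by omega)
      · rw [if_neg hc, if_neg hc]
        norm_num
        exact ih q (by simp) (fun x hx => hnn x (List.mem_cons_of_mem q hx)) (by omega)

theorem pvRun_spec (cs t : List Char) (ht : t ≠ []) :
    ∀ (fuel j : Nat) (c m : Int), j ≤ cs.length → cs.length + 1 - j ≤ fuel → 1 ≤ c → c ≤ m →
    j ≤ (pvRun cs t fuel j c).2 ∧ (pvRun cs t fuel j c).2 ≤ cs.length ∧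
    c ≤ (pvRun cs t fuel j c).1 ∧
    pvMr (t.length : Int) (pvGl cs t ht j) ((j : Int) - (t.length : Int)) m c =
      max m (max (pvRun cs t fuel j c).1 (pvAVal (t.length : Int) (pvGl cs t ht (pvRun cs t fuel j c).2))) := by
  have hL : 1 ≤ t.length := List.length_pos_of_ne_nil ht
  intro fuel
  induction fuel with
  | zero => intro j c m hj hf hc hcm; omega
  | succ f ih =>
    intro j c m hj hf hc hcm
    simp only [pvRun]
    by_cases hM : t <+: cs.drop j
    · rw [if_pos ((PySem.Chars.startswith_iff (cs.drop j) t).mpr hM)]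
      have hpre : t <+: cs.drop j := hM
      have hb := pvPrefix_bound cs t j ht hpre
      obtain ⟨h1, h2, h3, h4⟩ := ih (j + t.length) (c + 1) (max m (c + 1)) (by omega) (by omega) (by omega) (le_max_right _ _)
      refine ⟨by omega, h2, by omega, ?_⟩
      rw [pvGl_cons cs t ht j hj hpre, pvMr]
      rw [if_pos rfl, pvMaxIf]
      have hcast : ((j + t.length : Nat) : Int) - (t.length : Int) = (j : Int) := by push_cast; ring
      rw [hcast] at h4
      rw [h4]
      simp only [Int.max_def]
      split_ifs <;> omega
    · rw [if_neg (fun h => hM ((PySem.Chars.startswith_iff (cs.drop j) t).mp h))]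
      have hnM : ¬ t <+: cs.drop j := hM
      refine ⟨le_refl _, hj, le_refl _, ?_⟩
      cases hgl : pvGl cs t ht j with
      | nil =>
        simp only [pvMr, pvAVal_nil, Int.max_def]
        split_ifs <;> omega
      | cons p rest =>
        have hpj : ((j + 1 : Nat) : Int) ≤ p := by
          have hstep := pvGl_step cs t ht j hj hnM
          exact pvGl_head_ge cs t ht (j + 1) p rest (by rw [← hstep, hgl])
        rw [pvMr]
        rw [if_neg (show ¬((j : Int) - (t.length : Int) = p - (t.length : Int)) by push_cast at hpj ⊢; omega)]
        rw [show (if m < (1 : Int) then (1 : Int) else m) = m by split_ifs <;> omega]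
        rw [pvMrMax (t.length : Int) rest p m 1 le_rfl (by omega), pvAVal_cons]
        simp only [Int.max_def]
        split_ifs <;> omega

theorem pvScan_spec (cs t : List Char) (ht : t ≠ []) :
    ∀ (fuel k : Nat) (best : Int), k ≤ cs.length → cs.length + 1 - k ≤ fuel → 0 ≤ best →
    pvScan cs t fuel best k = max best (pvAVal (t.length : Int) (pvGl cs t ht k)) := by
  have hL : 1 ≤ t.length := List.length_pos_of_ne_nil ht
  intro fuel
  induction fuel with
  | zero => intro k best hk hf hb; omega
  | succ f ih =>
    intro k best hk hf hb
    simp only [pvScan]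
    by_cases hneg : PySem.Chars.findFrom cs t (k : Int) none < 0
    · rw [if_pos hneg]
      have hgl : pvGl cs t ht k = [] := by
        rw [pvGl, dif_pos hk]
        simp only []
        rw [dif_pos hneg]
      rw [hgl, pvAVal_nil, max_eq_left hb]
    · rw [if_neg hneg]
      have hne : PySem.Chars.findFrom cs t (k : Int) none ≠ -1 := by omega
      obtain ⟨hge, hpre, hmin⟩ := PySem.Chars.findFrom_natCast_spec cs t k hk hne
      have h0 : (0 : Int) ≤ (k : Int) := Int.natCast_nonneg k
      have hb' := pvPrefix_bound cs t _ ht hpre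
      have hgl : pvGl cs t ht k = PySem.Chars.findFrom cs t (k : Int) none ::
          pvGl cs t ht ((PySem.Chars.findFrom cs t (k : Int) none).toNat + t.length) := by
        rw [pvGl, dif_pos hk]
        simp only []
        rw [dif_neg hneg]
      obtain ⟨h1, h2, h3, h4⟩ := pvRun_spec cs t ht (cs.length + 1)
        ((PySem.Chars.findFrom cs t (k : Int) none).toNat + t.length) 1 1 (by omega) (by omega) (by omega) le_rfl
      rw [ih (pvRun cs t (cs.length + 1) ((PySem.Chars.findFrom cs t (k : Int) none).toNat + t.length) 1).2
          (if best < (pvRun cs t (cs.length + 1) ((PySem.Chars.findFrom cs t (k : Int) none).toNat + t.length) 1).1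
           then (pvRun cs t (cs.length + 1) ((PySem.Chars.findFrom cs t (k : Int) none).toNat + t.length) 1).1 else best)
          h2 (by omega) (by split_ifs <;> omega)]
      rw [hgl, pvAVal_cons]
      have hcast : (((PySem.Chars.findFrom cs t (k : Int) none).toNat + t.length : Nat) : Int) - (t.length : Int)
          = PySem.Chars.findFrom cs t (k : Int) none := by push_cast; omega
      rw [hcast] at h4
      rw [h4]
      simp only [Int.max_def]
      split_ifs <;> omega

theorem pvA_eq (cs t : List Char) (ht : t ≠ []) :
    pvFindMaxEntry (pvEntryLoop cs t (cs.length + 1) 0 []) (t.length : Int) =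
      pvAVal (t.length : Int) (pvGl cs t ht 0) := by
  have hL : 1 ≤ t.length := List.length_pos_of_ne_nil ht
  have hel := pvEntryLoop_eq cs t ht (cs.length + 1) 0 [] (by omega) (by omega)
  norm_num at hel
  rw [hel]
  cases hgl : pvGl cs t ht 0 with
  | nil =>
    simp [pvFindMaxEntry, pvAVal]
  | cons p rest =>
    have hnn := pvGl_nonneg cs t ht 0
    rw [hgl] at hnn
    have hp : 0 ≤ p := hnn p (by simp)
    rw [pvFindMaxEntry, if_neg (by simp)]
    rw [pvBridge ((p :: rest) ++ [-1]) (t.length : Int) (((p :: rest) ++ [-1]).length) 0 0 0 (by omega)]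
    simp only [List.drop_zero]
    have hprev : (PySem.List.pyGet? ((p :: rest) ++ [-1]) (((0 : Nat) : Int) - 1)).getD 0 = -1 := by
      norm_num
      simp [PySem.List.pyGet?, PySem.List.pyIdx?]
    rw [hprev]
    cases rest with
    | nil =>
      simp only [List.cons_append, List.nil_append, pvGo, pvMr, pvAVal_cons, List.headD]
      split_ifs <;> omega
    | cons q rest2 =>
      have hq : 0 ≤ q := hnn q (by simp)
      rw [List.cons_append, pvGo]
      rw [if_neg (by simp [List.headD]; omega)]
      rw [pvAVal_cons]
      by_cases hcq : (-1 : Int) = p - (t.length : Int)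
      · rw [if_pos hcq]
        norm_num
        exact pvGoMr (t.length : Int) (by exact_mod_cast hL) (q :: rest2) p _ _
          (fun x hx => hnn x (List.mem_cons_of_mem p hx)) (by omega) (by omega)
      · rw [if_neg hcq]
        exact pvGoMr0 (t.length : Int) (by exact_mod_cast hL) (q :: rest2) p (by simp)
          (fun x hx => hnn x (List.mem_cons_of_mem p hx)) (by omega)

theorem pvPer_s (cs t : List Char) (ht : t ≠ []) :
    pvFindMaxEntry (pvEntryLoop cs t (cs.length + 1) 0 []) (t.length : Int) =
      pvScan cs t (cs.length + 1) 0 0 := by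
  rw [pvA_eq cs t ht, pvScan_spec cs t ht (cs.length + 1) 0 0 (by omega) (by omega) le_rfl]
  rw [max_eq_right (pvAVal_nonneg _ _)]

theorem pvFold_getD_of_not_mem (f : String -> Int) :
    ∀ (l : List String) (d : PySem.Dict String Int) (k : String) (dflt : Int), k ∉ l →
    (l.foldl (fun d s => d.insert s (f s)) d).getD k dflt = d.getD k dflt := by
  intro l
  induction l with
  | nil => intro d k dflt _; rfl
  | cons a l ih =>
    intro d k dflt hk
    simp only [List.foldl_cons]
    rw [ih _ _ _ (by simp at hk; tauto)]
    exact PySem.Dict.getD_insert_of_ne d _ _ (by simp at hk; tauto)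

theorem pvFold_getD_of_mem (f : String -> Int) :
    ∀ (l : List String) (d : PySem.Dict String Int) (k : String) (dflt : Int), k ∈ l →
    (l.foldl (fun d s => d.insert s (f s)) d).getD k dflt = f k := by
  intro l
  induction l with
  | nil => intro d k dflt hk; simp at hk
  | cons a l ih =>
    intro d k dflt hk
    simp only [List.foldl_cons]
    by_cases hm : k ∈ l
    · exact ih _ _ _ hm
    · have hka : k = a := by simp at hk; tauto
      subst hka
      rw [pvFold_getD_of_not_mem f l _ k dflt hm]
      exact PySem.Dict.getD_insert_self d k (f k) dflt

theorem pvFold_keys (f : String -> Int) (l : List String) (d : PySem.Dict String Int) :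
    (l.foldl (fun d s => d.insert s (f s)) d).keys = PySem.Set.update d.keys l := by
  exact PySem.Dict.keys_foldl_insert l (fun _ s => f s) d

theorem pvFold_items (f : String -> Int) (l : List String) (d : PySem.Dict String Int)
    (hk : PySem.Set.update d.keys l = PySem.Set.ofList l) :
    (l.foldl (fun d s => d.insert s (f s)) d).items = (PySem.Set.ofList l).map (fun k => (k, f k)) := by
  have hkeys : (l.foldl (fun d s => d.insert s (f s)) d).keys = PySem.Set.ofList l := by
    rw [pvFold_keys f l d, hk]
  rw [PySem.Dict.items_eq_map_keys _ (by rw [hkeys]; exact PySem.Set.nodup_ofList l) 0, hkeys]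
  apply List.map_congr_left
  intro k hkm
  have : k ∈ l := (PySem.Set.mem_ofList l k).mp hkm
  rw [pvFold_getD_of_mem f l d k 0 this]


theorem pvUpdate_self (l : List String) :
    PySem.Set.update (PySem.Set.ofList l) l = PySem.Set.ofList l := by
  rw [PySem.Set.update_eq_append_filter]
  have : (PySem.Set.ofList l).filter (fun y => !(PySem.Set.contains (PySem.Set.ofList l) y)) = [] := by
    apply List.filter_eq_nil_iff.mpr
    intro a ha
    simp [ha]
  rw [this, List.append_nil]

-- ===== VERDICT (by name: the statement is the Claim_ definition above) =====
theorem analiser_spec : Claim_equal_analiser := by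
  unfold Claim_equal_analiser
  intro sample strs _hdom hpre
  unfold Spec_analiser analiser analiser_alt
  simp only []
  have hk0 : (strs.foldl (fun d s => PySem.Dict.insert d s (0 : Int)) PySem.Dict.empty).keys
      = PySem.Set.ofList strs := by
    rw [pvFold_keys (fun _ => (0 : Int)) strs PySem.Dict.empty, PySem.Dict.keys_empty]
    exact PySem.Set.update_empty strs
  rw [pvFold_items
      (fun s => pvFindMaxEntry (pvEntryLoop sample.toList s.toList (sample.toList.length + 1) 0 []) (s.toList.length : Int))
      strs _ (by rw [hk0]; exact pvUpdate_self strs)]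
  rw [pvFold_items
      (fun s => pvScan sample.toList s.toList (sample.toList.length + 1) 0 0)
      strs PySem.Dict.empty (by rw [PySem.Dict.keys_empty]; exact PySem.Set.update_empty strs)]
  apply List.map_congr_left
  intro s hs
  have hmem : s ∈ strs := (PySem.Set.mem_ofList strs s).mp hs
  have hne : s.toList ≠ [] := by
    intro h
    exact hpre s hmem (String.toList_eq_nil_iff.mp h)
  rw [Prod.mk.injEq]
  exact ⟨rfl, pvPer_s sample.toList s.toList hne⟩
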